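-- pv_equiv track=rewrite | github.com/mpc-msri/EzPC | Athos/CompilerScripts/generate_concat.py | generate_concat_axis
-- ===== SOURCE A (Python) =====
-- spaces = 4
--
-- def ind(indent):
--     return indent * spaces * " "
--
-- def generate_epilog(D, indent):
--     epilog = ""
--     for i in range(D):
--         epilog += ind(indent) + "};\n"
--         indent -= 1
--     return (epilog, indent)
--
-- def get_output_access(D):
--     access = ""
--     for i in range(D):
--         access += "[i" + str(i + 1) + "]"
--     return access
--
-- def get_input_access(tensor, axis, D):
--     access = ""
--     for i in range(D):
--         if i != axis:
--             access += "[i" + str(i + 1) + "]"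
--         else:
--             access += "[i" + str(i + 1)
--             for t in range(tensor):
--                 access += "-inp" + str(t + 1) + "s" + str(axis + 1)
--             access += "]"
--     return access
--
-- def generate_bound(tensor, axis):
--     sN = "s" + str(axis + 1)
--     inp1 = "inp1"
--     code = inp1 + sN
--     # loop starts from second tensor(1)
--     for i in range(1, tensor + 1):
--         code += " + inp" + str(i + 1) + sN
--     return code
--
-- def get_assgn_stmt(tensor, axis, D):
--     code = "outp" + get_output_access(D) + " = "
--     code += "inp" + str(tensor + 1) + get_input_access(tensor, axis, D) + ";\n"
--     return code
--
-- def generate_concat_axis(axis, indent, N, D):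
--     code = ""
--     loop_idx = "i" + str(axis + 1)
--     for i in range(N - 1):
--         code += ind(indent) + "if (" + loop_idx + " < ("
--         code += generate_bound(i, axis)
--         code += ")) {\n"
--         indent += 1
--         code += ind(indent) + get_assgn_stmt(i, axis, D)
--         indent -= 1
--         code += ind(indent) + "}\n"
--         code += ind(indent) + "else {\n"
--         indent += 1
--
--     # Trailing else block
--     code += ind(indent) + get_assgn_stmt(N - 1, axis, D)
--     indent -= 1
--     # code += ind(indent) + "};\n"
--     # indent -= 1
--
--     # close all branches
--     # code+="CONCAT START\n"
--     (close, indent) = generate_epilog(N - 1, indent)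
--
--     code += close
--     # code+="CONCAT END\n"
--     return (code, indent)
-- ===== SOURCE B (Python) =====
-- spaces = 4
--
-- def generate_concat_axis(axis, indent, N, D):
--     # Recursive generator: each if/else branch yields its header, delegates to
--     # the next tensor, and yields its own closing brace on the way back out,
--     # so no separate epilog pass is needed; one join builds the code.
--     ax = str(axis + 1)
--
--     def pad(level):
--         return " " * (spaces * level)
--
--     out_access = "".join("[i" + str(k + 1) + "]" for k in range(D))
--
--     def in_access(t):
--         off = "".join("-inp" + str(j + 1) + "s" + ax for j in range(t))
--         return "".join(
--             "[i" + str(k + 1) + (off if k == axis else "") + "]" for k in range(D)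
--         )
--
--     def assign(t):
--         return "outp" + out_access + " = inp" + str(t + 1) + in_access(t) + ";\n"
--
--     def bound(t):
--         return " + ".join("inp" + str(j) + "s" + ax for j in range(1, t + 2))
--
--     def emit(i, level):
--         if i >= N - 1:
--             yield pad(level) + assign(N - 1)
--             return
--         yield (pad(level) + "if (i" + ax + " < (" + bound(i) + ")) {\n"
--                + pad(level + 1) + assign(i)
--                + pad(level) + "}\n"
--                + pad(level) + "else {\n")
--         yield from emit(i + 1, level + 1)
--         yield pad(level) + "};\n"
--
--     return ("".join(emit(0, indent)), indent - 1)
-- ===== Notes on version B (the rewrite author's own statement) =====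
-- stated objective: alternative
-- what changed: Replaces A's flat header-emitting loop plus the separate brace-closing epilog pass by a recursive generator over the tensor index that yields each branch's closing brace on its return path, joined once at the end, with the access/bound substrings built by join-comprehensions.
import Mathlib
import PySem

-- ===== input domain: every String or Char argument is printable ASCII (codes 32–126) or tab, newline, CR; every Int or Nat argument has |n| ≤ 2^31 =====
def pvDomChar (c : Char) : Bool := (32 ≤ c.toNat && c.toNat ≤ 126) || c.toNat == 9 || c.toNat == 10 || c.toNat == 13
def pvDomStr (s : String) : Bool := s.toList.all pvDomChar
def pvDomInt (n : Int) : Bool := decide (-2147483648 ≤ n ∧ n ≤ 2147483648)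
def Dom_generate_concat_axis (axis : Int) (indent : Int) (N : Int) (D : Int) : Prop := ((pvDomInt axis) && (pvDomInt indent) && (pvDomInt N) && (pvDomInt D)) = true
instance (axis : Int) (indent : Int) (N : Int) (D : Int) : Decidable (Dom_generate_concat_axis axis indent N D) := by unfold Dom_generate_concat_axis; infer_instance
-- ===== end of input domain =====

-- B replaces A's flat header-emitting loop plus the separate brace-closing epilog pass by a single
-- recursion over the tensor index whose unwinding closes each brace; objective: alternative
-- decomposition, same output. Strings are modelled as List Char (PySem convention) and wrapped
-- into String once at the end.

-- ===== PORT A =====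
def pvSpaces : Int := 4

def pvA_ind (indent : Int) : List Char :=
  PySem.List.pyRepeat [' '] (indent * pvSpaces)

def pvA_epilog (D : Int) (indent : Int) : List Char × Int :=
  (PySem.List.pyRange 0 D 1).foldl
    (fun st _ => (st.1 ++ pvA_ind st.2 ++ "};\n".toList, st.2 - 1)) ([], indent)

def pvA_outAccess (D : Int) : List Char :=
  (PySem.List.pyRange 0 D 1).foldl
    (fun acc i => acc ++ "[i".toList ++ PySem.Int.toChars (i + 1) ++ "]".toList) []

def pvA_inAccess (tensor : Int) (axis : Int) (D : Int) : List Char :=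
  (PySem.List.pyRange 0 D 1).foldl
    (fun acc i =>
      if i ≠ axis then acc ++ "[i".toList ++ PySem.Int.toChars (i + 1) ++ "]".toList
      else ((PySem.List.pyRange 0 tensor 1).foldl
              (fun a t => a ++ "-inp".toList ++ PySem.Int.toChars (t + 1) ++ "s".toList
                            ++ PySem.Int.toChars (axis + 1))
              (acc ++ "[i".toList ++ PySem.Int.toChars (i + 1))) ++ "]".toList) []

def pvA_bound (tensor : Int) (axis : Int) : List Char :=
  let sN := "s".toList ++ PySem.Int.toChars (axis + 1)
  (PySem.List.pyRange 1 (tensor + 1) 1).foldl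
    (fun code i => code ++ " + inp".toList ++ PySem.Int.toChars (i + 1) ++ sN)
    ("inp1".toList ++ sN)

def pvA_assgn (tensor : Int) (axis : Int) (D : Int) : List Char :=
  "outp".toList ++ pvA_outAccess D ++ " = ".toList ++ "inp".toList
    ++ PySem.Int.toChars (tensor + 1) ++ pvA_inAccess tensor axis D ++ ";\n".toList

def generate_concat_axis (axis : Int) (indent : Int) (N : Int) (D : Int) : String × Int :=
  let loop_idx := "i".toList ++ PySem.Int.toChars (axis + 1)
  let st := (PySem.List.pyRange 0 (N - 1) 1).foldl
    (fun (st : List Char × Int) i =>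
      (st.1 ++ pvA_ind st.2 ++ "if (".toList ++ loop_idx ++ " < (".toList
            ++ pvA_bound i axis ++ ")) {\n".toList
            ++ pvA_ind (st.2 + 1) ++ pvA_assgn i axis D
            ++ pvA_ind (st.2 + 1 - 1) ++ "}\n".toList
            ++ pvA_ind (st.2 + 1 - 1) ++ "else {\n".toList,
       st.2 + 1 - 1 + 1)) ([], indent)
  let code := st.1 ++ pvA_ind st.2 ++ pvA_assgn (N - 1) axis D
  let ep := pvA_epilog (N - 1) (st.2 - 1)
  (String.ofList (code ++ ep.1), ep.2)

-- ===== PORT B =====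
-- ''.join(gen for k in range(n)) is ported as flatMap over pyRange, ' + '.join as pvB_join over
-- the mapped range (exact: Python str.join concatenates in order with the separator between
-- elements); the recursion emit(i, level) is structural recursion on (N - 1 - i).toNat, the
-- number of remaining header levels (exact: Python recurses while i < N - 1); the generator's
-- stream of yielded pieces is the returned list, ''.join over it is .flatten.
def pvB_pad (level : Int) : List Char :=
  PySem.List.pyRepeat [' '] (pvSpaces * level)

def pvB_join (sep : List Char) : List (List Char) → List Char
  | [] => []
  | [x] => x
  | x :: xs => x ++ sep ++ pvB_join sep xs

def pvB_outAccess (D : Int) : List Char :=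
  (PySem.List.pyRange 0 D 1).flatMap
    (fun k => "[i".toList ++ PySem.Int.toChars (k + 1) ++ "]".toList)

def pvB_inAccess (axis : Int) (ax : List Char) (t : Int) (D : Int) : List Char :=
  let off := (PySem.List.pyRange 0 t 1).flatMap
    (fun j => "-inp".toList ++ PySem.Int.toChars (j + 1) ++ "s".toList ++ ax)
  (PySem.List.pyRange 0 D 1).flatMap
    (fun k => "[i".toList ++ PySem.Int.toChars (k + 1)
                ++ (if k = axis then off else []) ++ "]".toList)

def pvB_assign (axis : Int) (ax : List Char) (D : Int) (t : Int) : List Char :=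
  "outp".toList ++ pvB_outAccess D ++ " = inp".toList ++ PySem.Int.toChars (t + 1)
    ++ pvB_inAccess axis ax t D ++ ";\n".toList

def pvB_bound (ax : List Char) (t : Int) : List Char :=
  pvB_join " + ".toList
    ((PySem.List.pyRange 1 (t + 2) 1).map
      (fun j => "inp".toList ++ PySem.Int.toChars j ++ "s".toList ++ ax))

def pvB_emit (axis : Int) (ax : List Char) (N : Int) (D : Int) (i : Int) (level : Int) :
    List (List Char) :=
  if N - 1 ≤ i then [pvB_pad level ++ pvB_assign axis ax D (N - 1)]
  else
    [pvB_pad level ++ "if (i".toList ++ ax ++ " < (".toList ++ pvB_bound ax i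
       ++ ")) {\n".toList
       ++ pvB_pad (level + 1) ++ pvB_assign axis ax D i
       ++ pvB_pad level ++ "}\n".toList
       ++ pvB_pad level ++ "else {\n".toList]
      ++ pvB_emit axis ax N D (i + 1) (level + 1)
      ++ [pvB_pad level ++ "};\n".toList]
termination_by (N - 1 - i).toNat
decreasing_by omega

def generate_concat_axis_alt (axis : Int) (indent : Int) (N : Int) (D : Int) : String × Int :=
  let ax := PySem.Int.toChars (axis + 1)
  (String.ofList ((pvB_emit axis ax N D 0 indent).flatten), indent - 1)

-- ===== PRECONDITION & SPEC =====
def Spec_generate_concat_axis (axis : Int) (indent : Int) (N : Int) (D : Int) (out : String × Int) : Prop := out = generate_concat_axis_alt axis indent N D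
instance (axis : Int) (indent : Int) (N : Int) (D : Int) (out : String × Int) : Decidable (Spec_generate_concat_axis axis indent N D out) := by unfold Spec_generate_concat_axis; infer_instance

-- ===== CLAIM (what is proved, stated in full; the proofs are below) =====
def Claim_equal_generate_concat_axis : Prop := ∀ (axis : Int) (indent : Int) (N : Int) (D : Int), Dom_generate_concat_axis axis indent N D → Spec_generate_concat_axis axis indent N D (generate_concat_axis axis indent N D)

-- ===== LEMMAS AND PROOFS =====

-- shared cells/terms used by the characterisations of both sides
def pvCellOut (i : Int) : List Char := "[i".toList ++ PySem.Int.toChars (i + 1) ++ "]".toList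

def pvOff (axis j : Int) : List Char :=
  "-inp".toList ++ PySem.Int.toChars (j + 1) ++ "s".toList ++ PySem.Int.toChars (axis + 1)

def pvCellIn (axis t i : Int) : List Char :=
  if i ≠ axis then pvCellOut i
  else "[i".toList ++ PySem.Int.toChars (i + 1)
        ++ (PySem.List.pyRange 0 t 1).flatMap (pvOff axis) ++ "]".toList

def pvTerm (axis i : Int) : List Char :=
  " + inp".toList ++ PySem.Int.toChars (i + 1) ++ "s".toList ++ PySem.Int.toChars (axis + 1)

lemma pv_range_toNat (b : Int) :
    PySem.List.pyRange 0 b 1 = PySem.List.pyRange 0 ((b.toNat : Int)) 1 := by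
  rcases (by omega : 0 ≤ b ∨ b < 0) with h | h
  · rw [Int.toNat_of_nonneg h]
  · rw [PySem.List.pyRange_one_eq_nil (by omega), PySem.List.pyRange_one_eq_nil (by omega)]

lemma pv_range_len (m : Nat) : (PySem.List.pyRange 0 ((m : Int)) 1).length = m := by
  rw [PySem.List.pyRange_zero_natCast]; simp

-- ===== A-side characterisations =====
lemma pvA_outAccess_eq (D : Int) :
    pvA_outAccess D = (PySem.List.pyRange 0 D 1).flatMap pvCellOut := by
  unfold pvA_outAccess
  rw [PySem.List.foldl_congr_mem _ _ (fun acc i => acc ++ pvCellOut i) _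
        (by intro acc x _; simp [pvCellOut])]
  rw [PySem.List.foldl_append_eq_flatMap]; simp

lemma pvA_inAccess_eq (t axis D : Int) :
    pvA_inAccess t axis D = (PySem.List.pyRange 0 D 1).flatMap (pvCellIn axis t) := by
  unfold pvA_inAccess
  have hbody : ∀ (acc : List Char), ∀ i ∈ PySem.List.pyRange 0 D 1,
      (if i ≠ axis then acc ++ "[i".toList ++ PySem.Int.toChars (i + 1) ++ "]".toList
       else ((PySem.List.pyRange 0 t 1).foldl
               (fun a t' => a ++ "-inp".toList ++ PySem.Int.toChars (t' + 1) ++ "s".toList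
                              ++ PySem.Int.toChars (axis + 1))
               (acc ++ "[i".toList ++ PySem.Int.toChars (i + 1))) ++ "]".toList)
        = acc ++ pvCellIn axis t i := by
    intro acc i _
    by_cases h : i = axis
    · rw [if_neg (by simp [h])]
      rw [PySem.List.foldl_congr_mem _ _ (fun a j => a ++ pvOff axis j) _
            (by intro a j _; simp [pvOff])]
      rw [PySem.List.foldl_append_eq_flatMap]
      simp [pvCellIn, h, List.append_assoc]
    · rw [if_pos h]
      simp [pvCellIn, pvCellOut, h, List.append_assoc]
  rw [PySem.List.foldl_congr_mem _ _ (fun acc i => acc ++ pvCellIn axis t i) _ hbody]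
  rw [PySem.List.foldl_append_eq_flatMap]; simp

lemma pvA_bound_eq (t axis : Int) :
    pvA_bound t axis = "inp1".toList ++ "s".toList ++ PySem.Int.toChars (axis + 1)
      ++ (PySem.List.pyRange 1 (t + 1) 1).flatMap (pvTerm axis) := by
  unfold pvA_bound
  rw [PySem.List.foldl_congr_mem _ _ (fun code i => code ++ pvTerm axis i) _
        (by intro code i _; simp [pvTerm])]
  rw [PySem.List.foldl_append_eq_flatMap]; simp

def pvEpi : Nat → Int → List Char
  | 0, _ => []
  | m + 1, L => pvA_ind L ++ "};\n".toList ++ pvEpi m (L - 1)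

lemma pvA_epilog_eq (l : List Int) (acc : List Char) (L : Int) :
    (l.foldl (fun st _ => (st.1 ++ pvA_ind st.2 ++ "};\n".toList, st.2 - 1)) (acc, L))
      = (acc ++ pvEpi l.length L, L - l.length) := by
  induction l generalizing acc L with
  | nil => simp [pvEpi]
  | cons x l ih =>
      simp only [List.foldl_cons, List.length_cons]
      rw [ih]
      refine Prod.ext ?_ ?_
      · simp [pvEpi, List.append_assoc]
      · simp; omega

-- one header block (A's vocabulary), for tensor i at nesting level
def pvHdrOne (axis D i level : Int) : List Char :=
  pvA_ind level ++ "if (".toList ++ ("i".toList ++ PySem.Int.toChars (axis + 1))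
    ++ " < (".toList ++ pvA_bound i axis ++ ")) {\n".toList
    ++ pvA_ind (level + 1) ++ pvA_assgn i axis D
    ++ pvA_ind level ++ "}\n".toList
    ++ pvA_ind level ++ "else {\n".toList

-- headers for tensors i0, i0+1, … at levels level, level+1, …
def pvHdrFrom (axis D : Int) : Int → Nat → Int → List Char
  | _, 0, _ => []
  | i0, m + 1, level => pvHdrOne axis D i0 level ++ pvHdrFrom axis D (i0 + 1) m (level + 1)

lemma pvHdrFrom_snoc (axis D i0 level : Int) (m : Nat) :
    pvHdrFrom axis D i0 (m + 1) level
      = pvHdrFrom axis D i0 m level ++ pvHdrOne axis D (i0 + (m : Int)) (level + (m : Int)) := by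
  induction m generalizing i0 level with
  | zero => simp [pvHdrFrom]
  | succ m ih =>
      rw [show pvHdrFrom axis D i0 (m + 1 + 1) level
            = pvHdrOne axis D i0 level ++ pvHdrFrom axis D (i0 + 1) (m + 1) (level + 1) from rfl,
          ih]
      simp only [pvHdrFrom, List.append_assoc]
      push_cast
      rw [show i0 + 1 + (m : Int) = i0 + ((m : Int) + 1) from by omega,
          show level + 1 + (m : Int) = level + ((m : Int) + 1) from by omega]

-- closing braces for levels level+m-1 down to level
def pvClFrom : Int → Nat → List Char
  | _, 0 => []
  | level, m + 1 => pvClFrom (level + 1) m ++ pvA_ind level ++ "};\n".toList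

lemma pvClFrom_cons (level : Int) (m : Nat) :
    pvClFrom level (m + 1)
      = pvA_ind (level + (m : Int)) ++ "};\n".toList ++ pvClFrom level m := by
  induction m generalizing level with
  | zero => simp [pvClFrom]
  | succ m ih =>
      rw [show pvClFrom level (m + 1 + 1)
            = pvClFrom (level + 1) (m + 1) ++ pvA_ind level ++ "};\n".toList from rfl,
          ih]
      simp only [pvClFrom, List.append_assoc]
      congr 2
      omega

lemma pvEpi_eq_pvClFrom (m : Nat) (level : Int) :
    pvEpi m (level + (m : Int) - 1) = pvClFrom level m := by
  induction m with
  | zero => simp [pvEpi, pvClFrom]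
  | succ m ih =>
      rw [show pvEpi (m + 1) (level + ((m + 1 : Nat) : Int) - 1)
            = pvA_ind (level + ((m + 1 : Nat) : Int) - 1) ++ "};\n".toList
                ++ pvEpi m (level + ((m + 1 : Nat) : Int) - 1 - 1) from rfl]
      rw [show level + ((m + 1 : Nat) : Int) - 1 - 1 = level + (m : Int) - 1 by push_cast; omega,
          ih, pvClFrom_cons,
          show level + ((m + 1 : Nat) : Int) - 1 = level + (m : Int) from by push_cast; omega]

lemma pvA_mainFold (axis D L : Int) (m : Nat) (acc : List Char) :
    ((PySem.List.pyRange 0 ((m : Int)) 1).foldl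
      (fun (st : List Char × Int) i =>
        (st.1 ++ pvA_ind st.2 ++ "if (".toList ++ ("i".toList ++ PySem.Int.toChars (axis + 1))
              ++ " < (".toList ++ pvA_bound i axis ++ ")) {\n".toList
              ++ pvA_ind (st.2 + 1) ++ pvA_assgn i axis D
              ++ pvA_ind (st.2 + 1 - 1) ++ "}\n".toList
              ++ pvA_ind (st.2 + 1 - 1) ++ "else {\n".toList,
         st.2 + 1 - 1 + 1)) (acc, L))
      = (acc ++ pvHdrFrom axis D 0 m L, L + (m : Int)) := by
  induction m generalizing acc with
  | zero =>
      rw [show ((0 : Nat) : Int) = 0 from rfl, PySem.List.pyRange_one_eq_nil (le_refl 0)]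
      simp [pvHdrFrom]
  | succ m ih =>
      rw [show ((m + 1 : Nat) : Int) = (m : Int) + 1 by push_cast; ring,
        PySem.List.pyRange_one_succ_right (by omega), List.foldl_append, ih]
      rw [pvHdrFrom_snoc]
      refine Prod.ext ?_ ?_
      · simp [pvHdrOne, List.append_assoc]
      · simp; omega

-- ===== B-side characterisations =====
lemma pvB_pad_eq (L : Int) : pvB_pad L = pvA_ind L := by
  unfold pvB_pad pvA_ind
  congr 1; exact mul_comm _ _

lemma pvB_outAccess_eq (D : Int) :
    pvB_outAccess D = (PySem.List.pyRange 0 D 1).flatMap pvCellOut := by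
  unfold pvB_outAccess
  congr 1

lemma pvB_inAccess_eq (axis t D : Int) :
    pvB_inAccess axis (PySem.Int.toChars (axis + 1)) t D
      = (PySem.List.pyRange 0 D 1).flatMap (pvCellIn axis t) := by
  unfold pvB_inAccess
  dsimp only
  congr 1; funext k
  by_cases h : k = axis
  · subst h
    simp [pvCellIn]
    congr 1
    funext j
    simp [pvOff]
  · simp [h, pvCellIn, pvCellOut]

lemma pvB_assign_eq (axis D t : Int) :
    pvB_assign axis (PySem.Int.toChars (axis + 1)) D t = pvA_assgn t axis D := by
  unfold pvB_assign pvA_assgn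
  rw [pvB_outAccess_eq, pvB_inAccess_eq, pvA_outAccess_eq, pvA_inAccess_eq]
  simp [List.append_assoc]

lemma pvB_join_snoc (sep x : List Char) (xs : List (List Char)) (h : xs ≠ []) :
    pvB_join sep (xs ++ [x]) = pvB_join sep xs ++ sep ++ x := by
  induction xs with
  | nil => exact absurd rfl h
  | cons y ys ih =>
      cases ys with
      | nil => simp [pvB_join]
      | cons z zs =>
          rw [show (y :: z :: zs) ++ [x] = y :: ((z :: zs) ++ [x]) from rfl]
          rw [show pvB_join sep (y :: ((z :: zs) ++ [x]))
                = y ++ sep ++ pvB_join sep ((z :: zs) ++ [x]) from by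
              cases zs <;> rfl]
          rw [ih (by simp)]
          rw [show pvB_join sep (y :: z :: zs) = y ++ sep ++ pvB_join sep (z :: zs) from by
              cases zs <;> rfl]
          simp [List.append_assoc]

lemma pvB_bound_eq_aux (axis : Int) (g : Int → List Char)
    (hg : ∀ j, g j = "inp".toList ++ PySem.Int.toChars j ++ "s".toList
                  ++ PySem.Int.toChars (axis + 1)) (m : Nat) :
    pvB_join " + ".toList ((PySem.List.pyRange 1 ((m : Int) + 2) 1).map g)
      = g 1 ++ (PySem.List.pyRange 1 ((m : Int) + 1) 1).flatMap (pvTerm axis) := by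
  induction m with
  | zero =>
      rw [show ((0 : Nat) : Int) + 2 = 1 + 1 by omega, PySem.List.pyRange_one_singleton,
          show ((0 : Nat) : Int) + 1 = 1 by omega, PySem.List.pyRange_one_eq_nil (le_refl 1)]
      simp [pvB_join]
  | succ m ih =>
      rw [show ((m + 1 : Nat) : Int) + 2 = ((m : Int) + 2) + 1 by push_cast; ring,
          PySem.List.pyRange_one_succ_right (by omega), List.map_append, List.map_singleton,
          pvB_join_snoc _ _ _ (by
            intro hnil
            have hl := congrArg List.length hnil
            simp [PySem.List.length_pyRange_one] at hl
            omega),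
          ih,
          show ((m + 1 : Nat) : Int) + 1 = ((m : Int) + 1) + 1 by push_cast; ring,
          PySem.List.pyRange_one_succ_right (a := 1) (b := (m : Int) + 1) (by omega)]
      simp [pvTerm, hg, List.append_assoc,
        show (m : Int) + 2 = ((m : Int) + 1) + 1 by omega]

lemma pvB_bound_eq (axis t : Int) (ht : 0 ≤ t) :
    pvB_bound (PySem.Int.toChars (axis + 1)) t = pvA_bound t axis := by
  unfold pvB_bound
  rw [show t + 2 = ((t.toNat : Nat) : Int) + 2 by omega,
      pvB_bound_eq_aux axis _ (fun _ => rfl) t.toNat,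
      show ((t.toNat : Nat) : Int) + 1 = t + 1 by omega,
      pvA_bound_eq]
  have h1 : PySem.Int.toChars 1 = ['1'] := by decide
  simp [h1]

lemma pvB_emit_eq (axis N D : Int) (m : Nat) :
    ∀ (i level : Int), 0 ≤ i → (N - 1 - i).toNat = m →
    (pvB_emit axis (PySem.Int.toChars (axis + 1)) N D i level).flatten
      = pvHdrFrom axis D i m level ++ pvA_ind (level + (m : Int))
          ++ pvA_assgn (N - 1) axis D ++ pvClFrom level m := by
  induction m with
  | zero =>
      intro i level hi hm
      rw [pvB_emit, if_pos (by omega)]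
      rw [pvB_pad_eq, pvB_assign_eq]
      simp [pvHdrFrom, pvClFrom]
  | succ m ih =>
      intro i level hi hm
      rw [pvB_emit, if_neg (by omega)]
      rw [List.flatten_append, List.flatten_append,
          ih (i + 1) (level + 1) (by omega) (by omega)]
      simp only [pvB_pad_eq, pvB_assign_eq]
      rw [pvB_bound_eq axis i hi]
      rw [show pvHdrFrom axis D i (m + 1) level
            = pvHdrOne axis D i level ++ pvHdrFrom axis D (i + 1) m (level + 1) from rfl]
      rw [show pvClFrom level (m + 1)
            = pvClFrom (level + 1) m ++ pvA_ind level ++ "};\n".toList from rfl]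
      rw [show level + ((m + 1 : Nat) : Int) = level + 1 + (m : Int) by push_cast; ring]
      simp [pvHdrOne, List.append_assoc]

-- ===== VERDICT (by name: the statement is the Claim_ definition above) =====
theorem generate_concat_axis_spec : Claim_equal_generate_concat_axis := by
  intro axis indent N D _
  unfold Spec_generate_concat_axis generate_concat_axis generate_concat_axis_alt
  dsimp only
  rw [pv_range_toNat (N - 1), pvA_mainFold]
  unfold pvA_epilog
  rw [pv_range_toNat (N - 1), pvA_epilog_eq, pv_range_len]
  rw [pvB_emit_eq axis N D (N - 1).toNat 0 indent (le_refl 0) (by omega)]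
  refine Prod.ext ?_ ?_
  · simp only []
    congr 1
    rw [show indent + (((N - 1).toNat : Nat) : Int) - 1
          = indent + (((N - 1).toNat : Nat) : Int) - 1 from rfl]
    rw [← pvEpi_eq_pvClFrom (N - 1).toNat indent]
    simp [List.append_assoc]
  · simp; omega
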